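-- pv_equiv track=rewrite | github.com/thad0ctor/axolotl | src/axolotl/integrations/protrain/chunk/sizing.py | _simulate_waste
-- ===== SOURCE A (Python) =====
-- def _simulate_waste(sizes_in_order: list[int], S_chunk: int) -> int:
--     """Return total fragmentation waste for a greedy-fit layout.
--
--     Mirrors the non-block-grouped ``build_layout`` inner loop: open a fresh
--     chunk once the next param wouldn't fit. The last chunk's trailing slack
--     is *not* counted as waste — it's just the natural tail and the caller
--     can't recover bytes by picking a different ``S_chunk``. Every earlier
--     chunk contributes ``S_chunk - bytes_used``.
--     """
--     if S_chunk <= 0: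
--         raise ValueError(f"S_chunk must be positive, got {S_chunk}")
--
--     chunk_bytes: list[int] = [0]
--     for sz in sizes_in_order:
--         cur = chunk_bytes[-1]
--         if cur > 0 and cur + sz > S_chunk:
--             chunk_bytes.append(0)
--         chunk_bytes[-1] += sz
--
--     if len(chunk_bytes) <= 1:
--         return 0
--     # Exclude the tail chunk from waste accounting — its slack is inherent.
--     return sum(max(0, S_chunk - b) for b in chunk_bytes[:-1])
-- ===== SOURCE B (Python) =====
-- def _simulate_waste(sizes_in_order: list[int], S_chunk: int) -> int:
--     """Single greedy pass: accumulate waste when a chunk is closed; the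
--     still-open final chunk is never charged."""
--     if S_chunk <= 0:
--         raise ValueError(f"S_chunk must be positive, got {S_chunk}")
--     cur = 0
--     waste = 0
--     for sz in sizes_in_order:
--         if cur > 0 and cur + sz > S_chunk:
--             waste += max(0, S_chunk - cur)
--             cur = 0
--         cur += sz
--     return waste
-- ===== Notes on version B (the rewrite author's own statement) =====
-- stated objective: simpler
-- what changed: B computes the waste in one pass with two integer accumulators (current chunk bytes and running waste), instead of materialising the whole chunk_bytes list and then summing a generator over its prefix in a second pass; same O(n) time, O(1) space and no second pass.
import Mathlib
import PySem

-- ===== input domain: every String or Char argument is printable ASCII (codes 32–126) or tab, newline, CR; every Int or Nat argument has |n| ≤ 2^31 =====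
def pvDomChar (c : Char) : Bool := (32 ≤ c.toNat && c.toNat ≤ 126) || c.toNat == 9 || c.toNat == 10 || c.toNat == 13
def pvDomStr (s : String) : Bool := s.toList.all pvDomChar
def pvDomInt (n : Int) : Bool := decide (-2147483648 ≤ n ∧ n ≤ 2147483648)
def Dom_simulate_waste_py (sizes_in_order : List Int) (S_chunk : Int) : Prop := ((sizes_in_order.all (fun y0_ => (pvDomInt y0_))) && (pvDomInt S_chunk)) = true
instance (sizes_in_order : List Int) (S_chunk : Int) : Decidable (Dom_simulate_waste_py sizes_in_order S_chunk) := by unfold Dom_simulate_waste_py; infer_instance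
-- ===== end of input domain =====

-- B folds one pass with two integer accumulators (current chunk, waste) instead of
-- building the chunk_bytes list and summing over its prefix in a second pass (objective: simpler).

-- ===== PORT A =====
-- chunk_bytes is kept in REVERSED order: the head is Python's chunk_bytes[-1].
def simulate_waste_py (sizes_in_order : List Int) (S_chunk : Int) : Int :=
  let rev := sizes_in_order.foldl (fun rev sz =>
    match rev with
    | [] => [sz]  -- unreachable: the list starts as [0] and never shrinks
    | cur :: rest =>
        if cur > 0 ∧ cur + sz > S_chunk then sz :: cur :: rest
        else (cur + sz) :: rest) [0]
  if rev.length ≤ 1 then 0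
  else (rev.tail.map (fun b => max 0 (S_chunk - b))).sum

-- ===== PORT B =====
def simulate_waste_py_alt (sizes_in_order : List Int) (S_chunk : Int) : Int :=
  (sizes_in_order.foldl (fun (st : Int × Int) sz =>
      if st.1 > 0 ∧ st.1 + sz > S_chunk then (sz, st.2 + max 0 (S_chunk - st.1))
      else (st.1 + sz, st.2)) (0, 0)).2

-- ===== PRECONDITION & SPEC =====
-- Pre_: A (and B) raise ValueError when S_chunk <= 0.
def Pre_simulate_waste_py (_sizes_in_order : List Int) (S_chunk : Int) : Prop := 0 < S_chunk
instance (sizes_in_order : List Int) (S_chunk : Int) : Decidable (Pre_simulate_waste_py sizes_in_order S_chunk) := by unfold Pre_simulate_waste_py; infer_instance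
def pvWitness_simulate_waste_py : List Int × Int := ([3, 2, 4, 1], 5)

def Spec_simulate_waste_py (sizes_in_order : List Int) (S_chunk : Int) (out : Int) : Prop := out = simulate_waste_py_alt sizes_in_order S_chunk
instance (sizes_in_order : List Int) (S_chunk : Int) (out : Int) : Decidable (Spec_simulate_waste_py sizes_in_order S_chunk out) := by unfold Spec_simulate_waste_py; infer_instance

-- ===== CLAIM (what is proved, stated in full; the proofs are below) =====
def Claim_equal_simulate_waste_py : Prop := ∀ (sizes_in_order : List Int) (S_chunk : Int), Dom_simulate_waste_py sizes_in_order S_chunk → Pre_simulate_waste_py sizes_in_order S_chunk → Spec_simulate_waste_py sizes_in_order S_chunk (simulate_waste_py sizes_in_order S_chunk)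

-- ===== LEMMAS AND PROOFS =====

-- Invariant: the waste of the closed chunks (the tail of A's reversed list)
-- equals B's running accumulator, at every point of the two folds.
theorem waste_invariant (S : Int) (l : List Int) : ∀ (cur : Int) (rest : List Int),
    ((l.foldl (fun rev sz =>
        match rev with
        | [] => [sz]
        | c :: r => if c > 0 ∧ c + sz > S then sz :: c :: r else (c + sz) :: r)
      (cur :: rest)).tail.map (fun b => max 0 (S - b))).sum
    = (l.foldl (fun (st : Int × Int) sz =>
        if st.1 > 0 ∧ st.1 + sz > S then (sz, st.2 + max 0 (S - st.1))
        else (st.1 + sz, st.2))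
      (cur, (rest.map (fun b => max 0 (S - b))).sum)).2 := by
  induction l with
  | nil => intro cur rest; simp
  | cons sz l ih =>
    intro cur rest
    by_cases h : cur > 0 ∧ cur + sz > S
    · simp only [List.foldl_cons, if_pos h]
      rw [ih sz (cur :: rest)]
      congr 2
      simp [add_comm]
    · simp only [List.foldl_cons, if_neg h]
      exact ih (cur + sz) rest

-- The 'len(chunk_bytes) <= 1' early return equals the sum over the (then empty) prefix.
theorem simulate_eq_tailsum (sizes : List Int) (S : Int) :
    simulate_waste_py sizes S
    = ((sizes.foldl (fun rev sz =>
        match rev with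
        | [] => [sz]
        | c :: r => if c > 0 ∧ c + sz > S then sz :: c :: r else (c + sz) :: r)
      [0]).tail.map (fun b => max 0 (S - b))).sum := by
  simp only [simulate_waste_py]
  set rev := sizes.foldl (fun rev sz =>
        match rev with
        | [] => [sz]
        | c :: r => if c > 0 ∧ c + sz > S then sz :: c :: r else (c + sz) :: r) [0] with hrev
  split_ifs with h
  · match rev, h with
    | [], _ => simp
    | [x], _ => simp
    | a :: b :: r, h => simp at h
  · rfl

-- ===== VERDICT (by name: the statement is the Claim_ definition above) =====
theorem simulate_waste_py_spec : Claim_equal_simulate_waste_py := by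
  intro sizes S _ _
  unfold Spec_simulate_waste_py simulate_waste_py_alt
  rw [simulate_eq_tailsum]
  have := waste_invariant S sizes 0 []
  simpa using this
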